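-- pv_equiv track=rewrite | github.com/YIlyaA/LABS_python | random_projects/magic_word.py | magic_word
-- ===== SOURCE A (Python) =====
-- def magic_word(sub_list):
--     count = 0
--     for el in sub_list:
--         for letters in el:
--             t = []
--             for letter in letters:
--                 t.append(ord(letter))
--             test = 0
--             for i in range(len(t) - 1):
--                 if t[i] < t[i + 1]:
--                     test += 1
--             if test == len(t) - 1:
--                 count += 1
--     return count
-- ===== SOURCE B (Python) =====
-- def magic_word(sub_list):
--     count = 0
--     for el in sub_list:
--         for letters in el:
--             if letters and list(letters) == sorted(letters) and len(set(letters)) == len(letters):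
--                 count += 1
--     return count
-- ===== Notes on version B (the rewrite author's own statement) =====
-- stated objective: idiomatic
-- what changed: Replaces the explicit ord-list build and adjacent-pair counting loop with a declarative predicate: a string counts iff it is non-empty, already sorted, and has all-distinct characters.
import Mathlib
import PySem

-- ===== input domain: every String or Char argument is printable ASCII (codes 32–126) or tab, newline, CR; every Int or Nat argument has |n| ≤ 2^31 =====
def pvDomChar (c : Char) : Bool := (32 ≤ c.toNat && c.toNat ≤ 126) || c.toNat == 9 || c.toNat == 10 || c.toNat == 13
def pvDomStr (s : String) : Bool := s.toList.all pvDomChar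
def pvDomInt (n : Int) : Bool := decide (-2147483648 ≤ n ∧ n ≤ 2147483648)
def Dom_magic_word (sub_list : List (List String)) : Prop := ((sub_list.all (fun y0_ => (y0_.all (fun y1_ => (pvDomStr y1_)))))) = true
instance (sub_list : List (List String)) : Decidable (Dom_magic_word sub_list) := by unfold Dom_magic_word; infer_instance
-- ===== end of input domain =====

-- B replaces A's explicit ord-list build and adjacent-pair counting loop by the
-- declarative predicate "non-empty ∧ already sorted ∧ all characters distinct" (idiomatic; not faster).

-- ===== PORT A =====
def magic_word (sub_list : List (List String)) : Int :=
  sub_list.foldl (fun count el =>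
    el.foldl (fun count letters =>
      let t : List Int := letters.toList.foldl (fun t letter => t ++ [(letter.toNat : Int)]) []
      let test : Int := (PySem.List.pyRange 0 (PySem.List.len t - 1) 1).foldl
        (fun test i =>
          if PySem.List.pyGetD t i 0 < PySem.List.pyGetD t (i + 1) 0 then test + 1 else test) 0
      if test = PySem.List.len t - 1 then count + 1 else count) count) 0

-- ===== PORT B =====
def magic_word_alt (sub_list : List (List String)) : Int :=
  sub_list.foldl (fun count el =>
    el.foldl (fun count letters =>
      if letters ≠ "" ∧ letters.toList = PySem.List.sorted letters.toList (fun c => c) ∧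
          PySem.Set.len (PySem.Set.ofList letters.toList) = PySem.Str.len letters
      then count + 1 else count) count) 0

-- ===== PRECONDITION & SPEC =====
def Spec_magic_word (sub_list : List (List String)) (out : Int) : Prop := out = magic_word_alt sub_list
instance (sub_list : List (List String)) (out : Int) : Decidable (Spec_magic_word sub_list out) := by unfold Spec_magic_word; infer_instance

-- ===== CLAIM (what is proved, stated in full; the proofs are below) =====
def Claim_equal_magic_word : Prop := ∀ (sub_list : List (List String)), Dom_magic_word sub_list → Spec_magic_word sub_list (magic_word sub_list)

-- ===== LEMMAS AND PROOFS =====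

theorem char_ord_lt (a b : Char) : ((a.toNat : Int) < (b.toNat : Int)) ↔ a < b := by
  rw [Char.lt_def]
  constructor <;> intro h
  · exact_mod_cast (show a.toNat < b.toNat by exact_mod_cast h)
  · exact_mod_cast (show a.toNat < b.toNat from h)

theorem pairwise_map_ord_iff (cs : List Char) :
    (cs.map (fun c => (c.toNat : Int))).Pairwise (· < ·) ↔ cs.Pairwise (· < ·) := by
  rw [List.pairwise_map]
  constructor <;> intro h
  · exact h.imp (fun hab => (char_ord_lt _ _).mp hab)
  · exact h.imp (fun hab => (char_ord_lt _ _).mpr hab)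

-- A's counting of adjacent strictly increasing pairs reaches len-1 iff the list is
-- non-empty and strictly increasing throughout.
theorem key_iff (cs : List Char) :
    ((PySem.List.pyRange 0 ((cs.length : Int) - 1) 1).foldl
        (fun test i =>
          if PySem.List.pyGetD (cs.map (fun c => (c.toNat : Int))) i 0 <
              PySem.List.pyGetD (cs.map (fun c => (c.toNat : Int))) (i + 1) 0
          then test + 1 else test) (0 : Int)
      = (cs.length : Int) - 1)
    ↔ (cs ≠ [] ∧ cs.Pairwise (· < ·)) := by
  rw [PySem.List.foldl_ite_add_one]
  have hlt : (cs.map (fun c => (c.toNat : Int))).length = cs.length := by simp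
  have hiff : (∀ i ∈ PySem.List.pyRange 0 ((cs.length : Int) - 1) 1,
      PySem.List.pyGetD (cs.map (fun c => (c.toNat : Int))) i 0 <
        PySem.List.pyGetD (cs.map (fun c => (c.toNat : Int))) (i + 1) 0)
      ↔ cs.Pairwise (· < ·) := by
    rw [← pairwise_map_ord_iff, ← List.isChain_iff_pairwise, List.isChain_iff_getElem]
    constructor
    · intro hp k hk
      have hk' : ((k : Int)) ∈ PySem.List.pyRange 0 ((cs.length : Int) - 1) 1 :=
        PySem.List.mem_pyRange_one.mpr ⟨by positivity, by rw [hlt] at hk; omega⟩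
      have h := hp _ hk'
      have e1 : ((k : Int)) + 1 = ((k + 1 : Nat) : Int) := by push_cast; ring
      rw [e1, PySem.List.pyGetD_eq_getElem _ _ (by positivity) (by rw [hlt]; omega),
        PySem.List.pyGetD_eq_getElem _ _ (by positivity) (by rw [hlt]; omega)] at h
      simpa using h
    · intro hp i hi
      obtain ⟨hi0, hi1⟩ := PySem.List.mem_pyRange_one.mp hi
      have hk : i.toNat + 1 < (cs.map (fun c => (c.toNat : Int))).length := by rw [hlt]; omega
      have h := hp i.toNat hk
      have e1 : (i + 1).toNat = i.toNat + 1 := by omega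
      rw [PySem.List.pyGetD_eq_getElem _ _ hi0 (by rw [hlt]; omega),
        PySem.List.pyGetD_eq_getElem _ _ (by omega) (by rw [hlt]; omega)]
      simp only [e1]
      exact h
  rcases eq_or_ne cs [] with h | h
  · subst h
    rw [PySem.List.pyRange_one_eq_nil (by norm_num)]
    simp
  · have hn : 0 < cs.length := List.length_pos_iff.mpr h
    have hlen : (PySem.List.pyRange 0 ((cs.length : Int) - 1) 1).length = cs.length - 1 := by
      rw [PySem.List.length_pyRange_one]; omega
    have hcount := List.countP_le_length
      (p := fun i => decide (PySem.List.pyGetD (cs.map (fun c => (c.toNat : Int))) i 0 <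
        PySem.List.pyGetD (cs.map (fun c => (c.toNat : Int))) (i + 1) 0))
      (l := PySem.List.pyRange 0 ((cs.length : Int) - 1) 1)
    constructor
    · intro hEq
      refine ⟨h, hiff.mp ?_⟩
      have hall : List.countP (fun i => decide (PySem.List.pyGetD (cs.map (fun c => (c.toNat : Int))) i 0 <
          PySem.List.pyGetD (cs.map (fun c => (c.toNat : Int))) (i + 1) 0))
          (PySem.List.pyRange 0 ((cs.length : Int) - 1) 1)
          = (PySem.List.pyRange 0 ((cs.length : Int) - 1) 1).length := by omega
      intro i hi
      exact of_decide_eq_true (List.countP_eq_length.mp hall i hi)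
    · rintro ⟨-, hp⟩
      have hall : ∀ i ∈ PySem.List.pyRange 0 ((cs.length : Int) - 1) 1,
          (fun i => decide (PySem.List.pyGetD (cs.map (fun c => (c.toNat : Int))) i 0 <
            PySem.List.pyGetD (cs.map (fun c => (c.toNat : Int))) (i + 1) 0)) i = true :=
        fun i hi => decide_eq_true (hiff.mpr hp i hi)
      rw [List.countP_eq_length.mpr hall, hlen]
      omega

theorem ofList_sublist {α : Type} [BEq α] [LawfulBEq α] (cs : List α) :
    (PySem.Set.ofList cs).Sublist cs := by
  induction cs using List.reverseRecOn with
  | nil => rw [PySem.Set.ofList_nil]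
  | append_singleton xs x ih =>
    rw [PySem.Set.ofList_append_singleton, PySem.Set.add_eq_ite]
    split
    · exact ih.trans (List.sublist_append_left xs [x])
    · exact ih.append (List.Sublist.refl [x])

theorem set_len_iff (cs : List Char) :
    (PySem.Set.ofList cs).length = cs.length ↔ cs.Nodup := by
  constructor
  · intro h
    have he := (ofList_sublist cs).eq_of_length h
    rw [← he]
    exact PySem.Set.nodup_ofList cs
  · intro h
    rw [PySem.Set.ofList_eq_self_of_nodup cs h]

theorem pairwise_lt_of_le_nodup {l : List Char} (h1 : l.Pairwise (· ≤ ·)) (h2 : l.Nodup) :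
    l.Pairwise (· < ·) := by
  induction l with
  | nil => exact List.Pairwise.nil
  | cons a t ih =>
    rw [List.pairwise_cons] at h1 ⊢
    rw [List.nodup_cons] at h2
    refine ⟨fun b hb => lt_of_le_of_ne (h1.1 b hb) ?_, ih h1.2 h2.2⟩
    intro hab
    exact h2.1 (hab ▸ hb)

theorem B_cond (s : String) :
    (s ≠ "" ∧ s.toList = PySem.List.sorted s.toList (fun c => c) ∧
      PySem.Set.len (PySem.Set.ofList s.toList) = PySem.Str.len s)
    ↔ (s.toList ≠ [] ∧ s.toList.Pairwise (· < ·)) := by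
  have h1 : s ≠ "" ↔ s.toList ≠ [] := not_congr (by rw [String.toList_eq_nil_iff])
  have h2 : (PySem.Set.len (PySem.Set.ofList s.toList) = PySem.Str.len s) ↔ s.toList.Nodup := by
    rw [← set_len_iff]
    simp [PySem.Set.len, PySem.Str.len_eq]
  constructor
  · rintro ⟨hne, hsorted, hlen⟩
    refine ⟨h1.mp hne, ?_⟩
    have hle : s.toList.Pairwise (· ≤ ·) := by
      have hp := PySem.List.sorted_pairwise s.toList (fun c => c)
      rw [← hsorted] at hp
      exact hp
    exact pairwise_lt_of_le_nodup hle (h2.mp hlen)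
  · rintro ⟨hne, hp⟩
    refine ⟨h1.mpr hne, ?_, h2.mpr ?_⟩
    · exact (PySem.List.sorted_eq_self_of_pairwise _ _ (hp.imp le_of_lt)).symm
    · exact hp.imp ne_of_lt

theorem step_iff (s : String) :
    ((PySem.List.pyRange 0
        (PySem.List.len (s.toList.foldl (fun t letter => t ++ [(letter.toNat : Int)]) []) - 1) 1).foldl
        (fun test i =>
          if PySem.List.pyGetD (s.toList.foldl (fun t letter => t ++ [(letter.toNat : Int)]) []) i 0 <
              PySem.List.pyGetD (s.toList.foldl (fun t letter => t ++ [(letter.toNat : Int)]) []) (i + 1) 0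
          then test + 1 else test) (0 : Int)
      = PySem.List.len (s.toList.foldl (fun t letter => t ++ [(letter.toNat : Int)]) []) - 1)
    ↔ (s ≠ "" ∧ s.toList = PySem.List.sorted s.toList (fun c => c) ∧
        PySem.Set.len (PySem.Set.ofList s.toList) = PySem.Str.len s) := by
  have ht : s.toList.foldl (fun t letter => t ++ [(letter.toNat : Int)]) []
      = s.toList.map (fun c => (c.toNat : Int)) := by
    simpa using PySem.List.foldl_append_singleton_eq_map (fun c : Char => (c.toNat : Int)) s.toList []
  rw [ht]
  have hlen : PySem.List.len (s.toList.map (fun c => (c.toNat : Int))) = (s.toList.length : Int) := by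
    simp [PySem.List.len]
  rw [hlen, key_iff s.toList, B_cond s]

-- ===== VERDICT (by name: the statement is the Claim_ definition above) =====
theorem magic_word_spec : Claim_equal_magic_word := by
  intro sub_list _
  unfold Spec_magic_word magic_word magic_word_alt
  have hstep : (fun (count : Int) (letters : String) =>
      let t : List Int := letters.toList.foldl (fun t letter => t ++ [(letter.toNat : Int)]) []
      let test : Int := (PySem.List.pyRange 0 (PySem.List.len t - 1) 1).foldl
        (fun test i =>
          if PySem.List.pyGetD t i 0 < PySem.List.pyGetD t (i + 1) 0 then test + 1 else test) 0
      if test = PySem.List.len t - 1 then count + 1 else count)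
      = (fun (count : Int) (letters : String) =>
      if letters ≠ "" ∧ letters.toList = PySem.List.sorted letters.toList (fun c => c) ∧
          PySem.Set.len (PySem.Set.ofList letters.toList) = PySem.Str.len letters
      then count + 1 else count) := by
    funext count letters
    show (if _ = _ then count + 1 else count) = _
    exact if_congr (step_iff letters) rfl rfl
  rw [hstep]
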